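-- pv_equiv track=rewrite | github.com/SamuelJPalacios/compilador_python | main.py | _get_clean_lexemes
-- ===== SOURCE A (Python) =====
-- def _get_clean_lexemes(code):
--     """
--     Función auxiliar para obtener una lista limpia de lexemas (tokens) del código.
--     Ahora ignora las llaves {} para el tokenizado.
--     """
--     OPERATORS = {"+", "-", "*", "/", "^"}
--     # SIMBOLS ahora incluye las llaves para aislamiento, pero las quitaremos al final.
--     SIMBOLS = {"=", ";", "(", ")", "{", "}"}
--
--     # Aislamiento de todos los símbolos
--     for char_to_isolate in OPERATORS | SIMBOLS:
--         # Añadir espacios alrededor de los símbolos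
--         code = code.replace(char_to_isolate, f" {char_to_isolate} ")
--
--     # Limpiar múltiples espacios
--     code = ' '.join(code.split())
--
--     # Obtener los tokens limpios y EXCLUIR las llaves.
--     # Quitaremos 'int', 'main', y los otros al inicio, ya que el problema es la expresión larga.
--
--     tokens = [part.strip() for part in code.split() if part.strip()]
--
--     # Filtramos la línea 'int main() { ... }' y los tipos de datos/declaraciones.
--     # Solo devolvemos los tokens que no son keywords estructurales.
--     keywords_to_ignore = {'int', 'double', 'float', 'void', 'main', '{', '}'}
--     return [t for t in tokens if t not in keywords_to_ignore]
-- ===== SOURCE B (Python) =====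
-- def _get_clean_lexemes(code):
--     """Single left-to-right scan: each symbol char is its own token, maximal runs
--     of non-space non-symbol chars are word tokens; then drop structural keywords."""
--     SYMBOLS = "=;(){}+-*/^"
--     tokens = []
--     i, n = 0, len(code)
--     while i < n:
--         c = code[i]
--         if c.isspace():
--             i += 1
--         elif c in SYMBOLS:
--             tokens.append(c)
--             i += 1
--         else:
--             j = i + 1
--             while j < n and not code[j].isspace() and code[j] not in SYMBOLS:
--                 j += 1
--             tokens.append(code[i:j])
--             i = j
--     keywords_to_ignore = {'int', 'double', 'float', 'void', 'main', '{', '}'}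
--     return [t for t in tokens if t not in keywords_to_ignore]
-- ===== Notes on version B (the rewrite author's own statement) =====
-- stated objective: alternative
-- what changed: A's eleven sequential str.replace isolation passes followed by split/join/split and a strip-filter pass are replaced by one left-to-right scan that emits each symbol character as its own token and each maximal run of non-space non-symbol characters as a word token, then applies the same keyword filter.
import Mathlib
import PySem

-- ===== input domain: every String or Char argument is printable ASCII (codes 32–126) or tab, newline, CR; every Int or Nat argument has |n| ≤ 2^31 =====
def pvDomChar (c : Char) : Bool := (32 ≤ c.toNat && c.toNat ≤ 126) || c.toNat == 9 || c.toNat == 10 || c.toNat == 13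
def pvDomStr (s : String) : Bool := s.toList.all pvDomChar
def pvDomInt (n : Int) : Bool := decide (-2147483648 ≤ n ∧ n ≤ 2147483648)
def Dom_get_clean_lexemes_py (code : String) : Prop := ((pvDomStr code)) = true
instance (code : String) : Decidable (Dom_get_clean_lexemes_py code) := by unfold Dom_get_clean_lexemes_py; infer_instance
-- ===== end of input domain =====

-- B replaces A's eleven sequential str.replace isolation passes plus split/join/split by ONE
-- left-to-right scan that emits each symbol char as its own token and maximal runs of
-- non-space non-symbol chars as word tokens (objective: alternative single-pass algorithm).

-- ===== PORT A =====
def pvKeywords : List String := ["int", "double", "float", "void", "main", "{", "}"]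

def get_clean_lexemes_py (code : String) : List String :=
  -- Python iterates OPERATORS | SIMBOLS in (unspecified) set order; the eleven single-char
  -- replaces commute, so a fixed order is used here.
  let code1 := (["=", ";", "(", ")", "{", "}", "+", "-", "*", "/", "^"] : List String).foldl
      (fun s c => PySem.Str.replace s c (" " ++ c ++ " ")) code
  let code2 := PySem.Str.join " " (PySem.Str.split₀ code1)
  let tokens := (PySem.Str.split₀ code2).filterMap
      (fun part => if PySem.Str.strip part ≠ "" then some (PySem.Str.strip part) else none)
  tokens.filter (fun t => !pvKeywords.contains t)

-- ===== PORT B =====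
def pvSymChars : List Char := ['=', ';', '(', ')', '{', '}', '+', '-', '*', '/', '^']

def pvIsSym (c : Char) : Bool := pvSymChars.contains c

def pvWordChar (c : Char) : Bool := !PySem.Chars.isspace c && !pvIsSym c

-- hand port of Source B's index scan (PySem has no while-loop primitive): the inner
-- `while j < n and …` advance over word characters is exactly takeWhile/dropWhile of
-- pvWordChar, code[i:j] is the taken run, and Chars.isspace is Python's str.isspace.
def pvTok : List Char → List (List Char)
  | [] => []
  | c :: t =>
    if PySem.Chars.isspace c then pvTok t
    else if pvIsSym c then [c] :: pvTok t
    else (c :: t.takeWhile pvWordChar) :: pvTok (t.dropWhile pvWordChar)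
  termination_by l => l.length
  decreasing_by
    · simp
    · simp
    · have := List.length_dropWhile_le pvWordChar t
      simp; omega

def get_clean_lexemes_py_alt (code : String) : List String :=
  let tokens := (pvTok code.toList).map String.ofList
  tokens.filter (fun t => !pvKeywords.contains t)

-- ===== PRECONDITION & SPEC =====
def Spec_get_clean_lexemes_py (code : String) (out : List String) : Prop := out = get_clean_lexemes_py_alt code
instance (code : String) (out : List String) : Decidable (Spec_get_clean_lexemes_py code out) := by unfold Spec_get_clean_lexemes_py; infer_instance

-- ===== CLAIM (what is proved, stated in full; the proofs are below) =====
def Claim_equal_get_clean_lexemes_py : Prop := ∀ (code : String), Dom_get_clean_lexemes_py code → Spec_get_clean_lexemes_py code (get_clean_lexemes_py code)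

-- ===== LEMMAS AND PROOFS =====

-- `pvF S x`: the effect of the isolation passes for the symbols in S on one character.
def pvF (S : List Char) (x : Char) : List Char := if S.contains x then [' ', x, ' '] else [x]

-- Python str.split() as a plain structural recursion (words between whitespace runs).
def pvWords : List Char → List (List Char)
  | [] => []
  | c :: t =>
    if PySem.Chars.isspace c then pvWords t
    else (c :: t.takeWhile (fun x => !PySem.Chars.isspace x)) ::
      pvWords (t.dropWhile (fun x => !PySem.Chars.isspace x))
  termination_by l => l.length
  decreasing_by
    · simp
    · have := List.length_dropWhile_le (fun x => !PySem.Chars.isspace x) t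
      simp; omega

lemma pvReplaceGo (c : Char) (new : List Char) :
    ∀ (fuel : Nat) (l acc : List Char), l.length ≤ fuel →
      PySem.Chars.replace.go [c] new fuel l acc
        = acc.reverse ++ l.flatMap (fun x => if x = c then new else [x]) := by
  intro fuel
  induction fuel with
  | zero =>
    intro l acc h
    have : l = [] := List.length_eq_zero_iff.mp (Nat.le_zero.mp h)
    subst this
    simp [PySem.Chars.replace.go]
  | succ n ih =>
    intro l acc h
    cases l with
    | nil => simp [PySem.Chars.replace.go]
    | cons x t =>
      rw [PySem.Chars.replace.go]
      by_cases hx : x = c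
      · subst hx
        have hp : List.isPrefixOf [x] (x :: t) = true := by simp [List.isPrefixOf]
        rw [if_pos hp, ih _ _ (by simpa using Nat.le_of_succ_le_succ h)]
        simp
      · have hp : List.isPrefixOf [c] (x :: t) = false := by
          simp [List.isPrefixOf]; exact fun hcx => (hx hcx.symm).elim
        rw [hp]
        simp only [Bool.false_eq_true, if_false]
        rw [ih _ _ (by simpa using Nat.le_of_succ_le_succ h)]
        simp [hx]

lemma pvReplaceSingle (c : Char) (new l : List Char) :
    PySem.Chars.replace l [c] new = l.flatMap (fun x => if x = c then new else [x]) := by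
  rw [PySem.Chars.replace]
  simp only [List.isEmpty_cons, Bool.false_eq_true, if_false]
  exact pvReplaceGo c new l.length l [] (le_refl _)

lemma pvChainStep (S : List Char) (c : Char) (hc : S.contains c = false) (hcs : c ≠ ' ')
    (hS : S.contains ' ' = false) (l : List Char) :
    (l.flatMap (pvF S)).flatMap (fun x => if x = c then [' ', c, ' '] else [x])
      = l.flatMap (pvF (c :: S)) := by
  have hc' : c ∉ S := by simpa using hc
  have hS' : ' ' ∉ S := by simpa using hS
  induction l with
  | nil => simp
  | cons x t ih =>
    simp only [List.flatMap_cons, List.flatMap_append, ih]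
    congr 1
    by_cases hxS : x ∈ S
    · have hxc : x ≠ c := fun h => hc' (h ▸ hxS)
      have hxsp : x ≠ ' ' := fun h => hS' (h ▸ hxS)
      have hsc : ¬ (' ' = c) := fun h => hcs h.symm
      simp [pvF, hxS, hxc, hsc, List.flatMap_cons]
    · by_cases hxc : x = c
      · subst hxc
        simp [pvF, hxS]
      · simp [pvF, hxS, hxc]

lemma pvChain : ∀ (cs S : List Char) (l : List Char), cs.Nodup →
    (∀ c ∈ cs, S.contains c = false ∧ c ≠ ' ') → S.contains ' ' = false →
    cs.foldl (fun s c => PySem.Chars.replace s [c] [' ', c, ' ']) (l.flatMap (pvF S))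
      = l.flatMap (pvF (cs.reverse ++ S)) := by
  intro cs
  induction cs with
  | nil => intro S l _ _ _; simp
  | cons c cs ih =>
    intro S l hnd hmem hsp
    simp only [List.foldl_cons, List.reverse_cons]
    obtain ⟨hcS, hcsp⟩ := hmem c List.mem_cons_self
    rw [pvReplaceSingle c [' ', c, ' '] _, pvChainStep S c hcS hcsp hsp l]
    rw [ih (c :: S) l hnd.of_cons]
    · simp
    · intro d hd
      obtain ⟨hdS, hdsp⟩ := hmem d (List.mem_cons_of_mem _ hd)
      refine ⟨?_, hdsp⟩
      have hdc : d ≠ c := fun h => (List.nodup_cons.mp hnd).1 (h ▸ hd)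
      have hdS' : d ∉ S := by simpa using hdS
      simp [hdS', hdc]
    · have h1 : (' ' : Char) ∉ S := by simpa using hsp
      have h2 : (' ' : Char) ≠ c := fun h => hcsp h.symm
      simp [h1, h2]

lemma pvFoldBridge : ∀ (cs : List Char) (s : String),
    ((cs.map (fun c => String.ofList [c])).foldl
        (fun s c => PySem.Str.replace s c (" " ++ c ++ " ")) s).toList
      = cs.foldl (fun l c => PySem.Chars.replace l [c] [' ', c, ' ']) s.toList := by
  intro cs
  induction cs with
  | nil => intro s; simp
  | cons c cs ih =>
    intro s
    simp only [List.map_cons, List.foldl_cons]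
    rw [ih]
    congr 1
    rw [PySem.Str.toList_replace]
    congr 1
    · exact String.toList_ofList
    · rw [String.toList_append, String.toList_append, String.toList_ofList]
      simp [String.toList_ofList]

lemma pvCode1 (code : String) :
    ((["=", ";", "(", ")", "{", "}", "+", "-", "*", "/", "^"] : List String).foldl
        (fun s c => PySem.Str.replace s c (" " ++ c ++ " ")) code).toList
      = code.toList.flatMap (pvF pvSymChars.reverse) := by
  have hmap : (["=", ";", "(", ")", "{", "}", "+", "-", "*", "/", "^"] : List String)
      = pvSymChars.map (fun c => String.ofList [c]) := by rfl
  have hid : code.toList.flatMap (pvF []) = code.toList := by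
    induction code.toList with
    | nil => rfl
    | cons x t ih => simp [pvF, ih]
  rw [hmap, pvFoldBridge pvSymChars code]
  conv_lhs => rw [← hid]
  rw [pvChain pvSymChars [] code.toList (by decide)
    (fun c hc => ⟨rfl, by fin_cases hc <;> decide⟩) rfl]
  simp

lemma pvSplitGo : ∀ (l cur : List Char) (acc : List (List Char)),
    PySem.Chars.split₀.go l cur acc
      = acc.reverse ++ (if cur.isEmpty then pvWords l
          else (cur.reverse ++ l.takeWhile (fun x => !PySem.Chars.isspace x)) ::
            pvWords (l.dropWhile (fun x => !PySem.Chars.isspace x))) := by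
  intro l
  induction l with
  | nil =>
    intro cur acc
    rw [PySem.Chars.split₀.go]
    cases cur with
    | nil => simp [pvWords]
    | cons a b => simp [pvWords]
  | cons c t ih =>
    intro cur acc
    rw [PySem.Chars.split₀.go]
    by_cases hsp : PySem.Chars.isspace c
    · cases cur with
      | nil => simp [hsp, ih, pvWords]
      | cons a b => simp [hsp, ih, pvWords]
    · cases cur with
      | nil => simp [hsp, ih, pvWords]
      | cons a b => simp [hsp, ih]

lemma pvSplit_eq (l : List Char) : PySem.Chars.split₀ l = pvWords l := by
  rw [PySem.Chars.split₀, pvSplitGo]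
  simp

lemma pvWords_props : ∀ (l : List Char), ∀ w ∈ pvWords l,
    w ≠ [] ∧ ∀ c ∈ w, PySem.Chars.isspace c = false := by
  intro l
  induction l using pvWords.induct with
  | case1 => simp [pvWords]
  | case2 c t hsp ih =>
    rw [pvWords, if_pos hsp]; exact ih
  | case3 c t hsp ih =>
    rw [pvWords, if_neg hsp]
    intro w hw
    rcases List.mem_cons.mp hw with rfl | hw'
    · refine ⟨by simp, ?_⟩
      intro x hx
      rcases List.mem_cons.mp hx with rfl | hx'
      · simpa using hsp
      · have := List.mem_takeWhile_imp hx'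
        simpa using this
    · exact ih w hw'

lemma pvWords_append_word (w r : List Char) (hw : w ≠ [])
    (hfree : ∀ c ∈ w, PySem.Chars.isspace c = false)
    (hr : ∀ c ∈ r.take 1, PySem.Chars.isspace c = true) :
    pvWords (w ++ r) = w :: pvWords r := by
  cases w with
  | nil => exact absurd rfl hw
  | cons c t =>
    have hc : PySem.Chars.isspace c = false := hfree c List.mem_cons_self
    rw [List.cons_append, pvWords, if_neg (by simp [hc])]
    have htake : (t ++ r).takeWhile (fun x => !PySem.Chars.isspace x) = t := by
      rw [List.takeWhile_append_of_pos (by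
        intro x hx; simp [hfree x (List.mem_cons_of_mem _ hx)])]
      cases r with
      | nil => simp
      | cons d u =>
        have hd : PySem.Chars.isspace d = true := hr d (by simp)
        simp [hd]
    have hdrop : (t ++ r).dropWhile (fun x => !PySem.Chars.isspace x) = r := by
      rw [List.dropWhile_append_of_pos (by
        intro x hx; simp [hfree x (List.mem_cons_of_mem _ hx)])]
      cases r with
      | nil => simp
      | cons d u =>
        have hd : PySem.Chars.isspace d = true := hr d (by simp)
        simp [hd]
    rw [htake, hdrop]

lemma pvJoinSplit : ∀ (ps : List (List Char)),
    (∀ p ∈ ps, p ≠ [] ∧ ∀ c ∈ p, PySem.Chars.isspace c = false) →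
    pvWords (PySem.Chars.join [' '] ps) = ps := by
  intro ps
  induction ps with
  | nil => intro _; simp [PySem.Chars.join, List.intercalate, pvWords]
  | cons p qs ih =>
    intro h
    obtain ⟨hp, hpf⟩ := h p List.mem_cons_self
    cases qs with
    | nil =>
      have : PySem.Chars.join [' '] [p] = p := by simp [PySem.Chars.join, List.intercalate]
      rw [this]
      have := pvWords_append_word p [] hp hpf (by simp)
      simpa [pvWords] using this
    | cons q rs =>
      have hj : PySem.Chars.join [' '] (p :: q :: rs)
          = p ++ (' ' :: PySem.Chars.join [' '] (q :: rs)) := by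
        simp [PySem.Chars.join, List.intercalate]
      rw [hj, pvWords_append_word p _ hp hpf (by simp; decide)]
      rw [show pvWords (' ' :: PySem.Chars.join [' '] (q :: rs))
            = pvWords (PySem.Chars.join [' '] (q :: rs)) from by
          rw [pvWords, if_pos (by decide)]]
      rw [ih (fun x hx => h x (List.mem_cons_of_mem _ hx))]

lemma pvSym_not_space (c : Char) (h : pvIsSym c = true) : PySem.Chars.isspace c = false := by
  have : c ∈ pvSymChars := by simpa [pvIsSym] using h
  fin_cases this <;> decide

lemma pvDropWhile_head (p : Char → Bool) (l : List Char) (x : Char) (xs : List Char)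
    (h : l.dropWhile p = x :: xs) : p x = false := by
  induction l with
  | nil => simp at h
  | cons a t ih =>
    rw [List.dropWhile_cons] at h
    by_cases hp : p a
    · simp [hp] at h; exact ih h
    · simp [hp] at h; simp [← h.1]; simpa using hp

-- a run of word characters is untouched by the isolation map

lemma pvFlatMap_word (w : List Char) (hw : ∀ c ∈ w, pvWordChar c = true) :
    w.flatMap (pvF pvSymChars) = w := by
  induction w with
  | nil => rfl
  | cons x t ih =>
    have hx : pvWordChar x = true := hw x List.mem_cons_self
    have hxs : pvIsSym x = false := by
      rcases Bool.and_eq_true_iff.mp hx with ⟨_, h2⟩; simpa using h2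
    have hx' : x ∉ pvSymChars := by simpa [pvIsSym] using hxs
    simp [pvF, hx', List.flatMap_cons, ih (fun c hc => hw c (List.mem_cons_of_mem _ hc))]

lemma pvE : ∀ (l : List Char), pvWords (l.flatMap (pvF pvSymChars)) = pvTok l := by
  intro l
  induction l using pvTok.induct with
  | case1 => simp [pvTok, pvWords]
  | case2 c t hsp ih =>
    -- c whitespace: not a symbol, maps to [c]
    have hns : pvIsSym c = false := by
      cases hcs : pvIsSym c
      · rfl
      · rw [pvSym_not_space c hcs] at hsp; cases hsp
    rw [List.flatMap_cons]
    show pvWords (pvF pvSymChars c ++ _) = _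
    rw [pvF, if_neg (by simp_all [pvIsSym])]
    rw [List.singleton_append, pvWords, if_pos hsp, ih, pvTok, if_pos hsp]
  | case3 c t hsp hsym ih =>
    rw [List.flatMap_cons]
    show pvWords (pvF pvSymChars c ++ _) = _
    rw [pvF, if_pos (by simpa [pvIsSym] using hsym)]
    have hcns := pvSym_not_space c hsym
    rw [show ([' ', c, ' '] ++ t.flatMap (pvF pvSymChars))
          = ' ' :: (c :: (' ' :: t.flatMap (pvF pvSymChars))) from rfl]
    rw [pvWords, if_pos (by decide), pvWords, if_neg (by simp [hcns])]
    rw [List.takeWhile_cons, if_neg (by decide), List.dropWhile_cons, if_neg (by decide)]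
    rw [pvWords, if_pos (by decide), ih, pvTok, if_neg (by simp [hsp]), if_pos hsym]
  | case4 c t hsp hsym ih =>
    rw [List.flatMap_cons]
    show pvWords (pvF pvSymChars c ++ _) = _
    have hcw : pvWordChar c = true := by
      simp [pvWordChar, hsp]; simpa [pvIsSym] using hsym
    rw [pvF, if_neg (by simpa [pvIsSym] using hsym), List.singleton_append]
    have hsplit : t = t.takeWhile pvWordChar ++ t.dropWhile pvWordChar :=
      (List.takeWhile_append_dropWhile).symm
    set w := t.takeWhile pvWordChar with hwdef
    set r := t.dropWhile pvWordChar with hrdef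
    have hwall : ∀ x ∈ w, pvWordChar x = true := fun x hx => List.mem_takeWhile_imp hx
    have hflat : t.flatMap (pvF pvSymChars) = w ++ r.flatMap (pvF pvSymChars) := by
      conv_lhs => rw [hsplit]
      rw [List.flatMap_append, pvFlatMap_word w hwall]
    rw [hflat, pvWords, if_neg (by simp [hsp])]
    have hhead : ∀ (x : Char) (xs : List Char), r.flatMap (pvF pvSymChars) = x :: xs →
        PySem.Chars.isspace x = true := by
      intro x xs hx
      cases hr : r with
      | nil => rw [hr] at hx; simp at hx
      | cons d u =>
        have hd : pvWordChar d = false := pvDropWhile_head pvWordChar t d u (hrdef ▸ hr)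
        rw [hr, List.flatMap_cons] at hx
        by_cases hds : pvIsSym d
        · rw [pvF, if_pos (by simpa [pvIsSym] using hds)] at hx
          cases hx; decide
        · have hds' : pvIsSym d = false := by simpa using hds
          have hdsp : PySem.Chars.isspace d = true := by
            simp [pvWordChar, hds'] at hd
            exact hd
          rw [pvF, if_neg (by simpa [pvIsSym] using hds)] at hx
          rw [List.singleton_append] at hx
          cases hx; exact hdsp
    have htake : (w ++ r.flatMap (pvF pvSymChars)).takeWhile (fun x => !PySem.Chars.isspace x) = w := by
      rw [List.takeWhile_append_of_pos (by
        intro x hx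
        have := hwall x hx
        simp [pvWordChar] at this
        simp [this.1])]
      cases hR : r.flatMap (pvF pvSymChars) with
      | nil => simp
      | cons x xs => simp [hhead x xs hR]
    have hdrop : (w ++ r.flatMap (pvF pvSymChars)).dropWhile (fun x => !PySem.Chars.isspace x)
        = r.flatMap (pvF pvSymChars) := by
      rw [List.dropWhile_append_of_pos (by
        intro x hx
        have := hwall x hx
        simp [pvWordChar] at this
        simp [this.1])]
      cases hR : r.flatMap (pvF pvSymChars) with
      | nil => simp
      | cons x xs => simp [hhead x xs hR]
    rw [htake, hdrop, ih, pvTok, if_neg (by simp [hsp]), if_neg (by simp [hsym])]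

lemma pvStrip_id (p : List Char) (h : ∀ c ∈ p, PySem.Chars.isspace c = false) :
    PySem.Chars.strip p = p := by
  have hdw : ∀ (l : List Char), (∀ c ∈ l, PySem.Chars.isspace c = false) →
      l.dropWhile PySem.Chars.isspace = l := by
    intro l hl
    cases l with
    | nil => rfl
    | cons a t => simp [hl a List.mem_cons_self]
  rw [PySem.Chars.strip, PySem.Chars.lstrip, PySem.Chars.rstrip]
  rw [hdw p h, hdw p.reverse (fun c hc => h c (List.mem_reverse.mp hc)), List.reverse_reverse]

lemma pvFilterMap_id (ps : List String)
    (h : ∀ p ∈ ps, p.toList ≠ [] ∧ ∀ c ∈ p.toList, PySem.Chars.isspace c = false) :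
    ps.filterMap
        (fun part => if PySem.Str.strip part ≠ "" then some (PySem.Str.strip part) else none)
      = ps := by
  induction ps with
  | nil => rfl
  | cons p qs ih =>
    obtain ⟨hp, hpf⟩ := h p List.mem_cons_self
    have hstrip : PySem.Str.strip p = p := by
      rw [← String.toList_inj, PySem.Str.toList_strip]
      exact pvStrip_id p.toList hpf
    have hne : PySem.Str.strip p ≠ "" := by
      rw [hstrip]
      intro hcon
      exact hp (by rw [hcon]; rfl)
    have hpne : p ≠ "" := hstrip ▸ hne
    rw [List.filterMap_cons]
    simp only [hstrip, hpne, ne_eq, not_false_iff, if_true]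
    rw [ih (fun x hx => h x (List.mem_cons_of_mem _ hx))]

lemma pvF_rev (x : Char) : pvF pvSymChars.reverse x = pvF pvSymChars x := by
  simp [pvF]

lemma pvMapToList_inj (xs ys : List String) (h : xs.map String.toList = ys.map String.toList) :
    xs = ys :=
  List.map_injective_iff.mpr (fun _ _ hab => String.toList_inj.mp hab) h

lemma pvMain (code : String) : get_clean_lexemes_py code = get_clean_lexemes_py_alt code := by
  rw [get_clean_lexemes_py, get_clean_lexemes_py_alt]
  set l := code.toList with hl
  set code1 := (["=", ";", "(", ")", "{", "}", "+", "-", "*", "/", "^"] : List String).foldl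
      (fun s c => PySem.Str.replace s c (" " ++ c ++ " ")) code with hcode1
  have h1 : code1.toList = l.flatMap (pvF pvSymChars) := by
    rw [hcode1, pvCode1 code]
    rw [show pvF pvSymChars.reverse = pvF pvSymChars from funext pvF_rev]
  have h2 : (PySem.Str.split₀ code1).map String.toList = pvTok l := by
    rw [PySem.Str.split₀_map_toList, h1, pvSplit_eq, pvE]
  have hprops : ∀ w ∈ pvTok l, w ≠ [] ∧ ∀ c ∈ w, PySem.Chars.isspace c = false := by
    intro w hw
    rw [← pvE l] at hw
    exact pvWords_props _ w hw
  have h3 : (PySem.Str.join " " (PySem.Str.split₀ code1)).toList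
      = PySem.Chars.join [' '] (pvTok l) := by
    rw [PySem.Str.toList_join, h2]; rfl
  have h4 : (PySem.Str.split₀ (PySem.Str.join " " (PySem.Str.split₀ code1))).map String.toList
      = pvTok l := by
    rw [PySem.Str.split₀_map_toList, h3, pvSplit_eq, pvJoinSplit _ hprops]
  set parts2 := PySem.Str.split₀ (PySem.Str.join " " (PySem.Str.split₀ code1)) with hparts2
  have hmemprops : ∀ p ∈ parts2, p.toList ≠ [] ∧ ∀ c ∈ p.toList, PySem.Chars.isspace c = false := by
    intro pp hpp
    have : pp.toList ∈ pvTok l := by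
      rw [← h4]; exact List.mem_map_of_mem hpp
    exact hprops _ this
  have h5 : parts2.filterMap
      (fun part => if PySem.Str.strip part ≠ "" then some (PySem.Str.strip part) else none)
        = parts2 := pvFilterMap_id parts2 hmemprops
  have h6 : parts2 = (pvTok l).map String.ofList := by
    apply pvMapToList_inj
    rw [h4, List.map_map]
    have : (String.toList ∘ String.ofList) = id := funext (fun cs => String.toList_ofList)
    rw [this, List.map_id]
  rw [h5, h6]

-- ===== VERDICT (by name: the statement is the Claim_ definition above) =====
theorem get_clean_lexemes_py_spec : Claim_equal_get_clean_lexemes_py := by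
  intro code _
  show get_clean_lexemes_py code = get_clean_lexemes_py_alt code
  exact pvMain code
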